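-- pv_equiv track=rewrite | github.com/eliottcassidy2000/math | 04-computation/algebraic_proof_cn3.py | compute_sigma_overlap
-- ===== SOURCE A (Python) =====
-- def compute_sigma_overlap(A):
--     """Compute sum over overlapping directed edge pairs T(a,b)*T(c,d) where {a,b}∩{c,d}≠∅."""
--     n = len(A)
--     scores = [sum(A[i]) for i in range(n)]
--     total = 0
--
--     # Case 1: a=c (share first vertex)
--     # sum_a sum_{b≠a} sum_{d≠a, d≠b} T(a,b)*T(a,d)
--     for a in range(n):
--         for b in range(n):
--             if b == a: continue
--             for d in range(n):
--                 if d == a or d == b: continue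
--                 total += A[a][b] * A[a][d]
--
--     # Case 2: a=d (first of one = second of other)
--     for a in range(n):
--         for b in range(n):
--             if b == a: continue
--             for c in range(n):
--                 if c == a or c == b: continue
--                 total += A[a][b] * A[c][a]
--
--     # Case 3: b=c (second of one = first of other)
--     for b in range(n):
--         for a in range(n):
--             if a == b: continue
--             for d in range(n):
--                 if d == b or d == a: continue
--                 total += A[a][b] * A[b][d]
--
--     # Case 4: b=d (share second vertex)
--     for b in range(n):
--         for a in range(n):
--             if a == b: continue
--             for c in range(n):
--                 if c == b or c == a: continue
--                 total += A[a][b] * A[c][b]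
--
--     return total
-- ===== SOURCE B (Python) =====
-- def compute_sigma_overlap(A):
--     """Compute sum over overlapping directed edge pairs T(a,b)*T(c,d) where {a,b} cap {c,d} != empty.
--
--     O(n^2): precompute row/column sums and collapse each triple sum into a
--     closed form with diagonal corrections."""
--     n = len(A)
--     if n < 3:
--         return 0  # every overlap case needs three pairwise-distinct indices
--     R = [sum(A[i][j] for j in range(n)) for i in range(n)]
--     C = [sum(A[i][j] for i in range(n)) for j in range(n)]
--     total = 0
--     for a in range(n):
--         d = A[a][a]
--         row = R[a] - d
--         col = C[a] - d
--         sq_row = sum(A[a][j] * A[a][j] for j in range(n)) - d * d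
--         sq_col = sum(A[i][a] * A[i][a] for i in range(n)) - d * d
--         cross = sum(A[a][j] * A[j][a] for j in range(n)) - d * d
--         total += row * row - sq_row + 2 * (row * col - cross) + col * col - sq_col
--     return total
-- ===== Notes on version B (the rewrite author's own statement) =====
-- stated objective: faster
-- what changed: Replaces the four O(n^3) triple loops by one O(n^2) pass: precompute row sums, column sums and per-index square/cross sums, and evaluate each overlap case by a closed form with diagonal corrections (plus an early 0 for n<3, where no triple of distinct indices exists).
-- outside the precondition, e.g. on compute_sigma_overlap([[1, 2, 3], [4, 5, 6], [7, 8]]): A returns 568, B raises IndexError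
import Mathlib
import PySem

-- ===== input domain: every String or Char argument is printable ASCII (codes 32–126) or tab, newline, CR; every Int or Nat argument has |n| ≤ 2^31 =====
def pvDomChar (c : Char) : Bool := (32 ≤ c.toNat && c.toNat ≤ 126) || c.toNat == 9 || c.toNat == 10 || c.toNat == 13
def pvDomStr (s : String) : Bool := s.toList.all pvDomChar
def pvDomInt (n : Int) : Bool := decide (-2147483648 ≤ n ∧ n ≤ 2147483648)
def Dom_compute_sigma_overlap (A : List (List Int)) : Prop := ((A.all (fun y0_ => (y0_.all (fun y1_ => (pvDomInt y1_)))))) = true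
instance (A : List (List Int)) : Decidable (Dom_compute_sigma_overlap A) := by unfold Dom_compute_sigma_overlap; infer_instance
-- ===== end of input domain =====

-- B replaces A's four triple loops by one pass over precomputed row/column/square/cross
-- sums, evaluating each overlap case by a closed form with diagonal corrections.

-- shared total form of A[i][j] (exact wherever Python does not raise; Pre_ excludes the raising inputs)
def pvT (A : List (List Int)) (i j : Int) : Int :=
  PySem.List.pyGetD (PySem.List.pyGetD A i []) j 0

-- ===== PORT A =====
def compute_sigma_overlap (A : List (List Int)) : Int :=
  let n : Int := PySem.List.len A
  let _scores : List Int := (PySem.List.pyRange 0 n 1).map (fun i => (PySem.List.pyGetD A i []).sum)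
  let total : Int := 0
  -- Case 1: a = c
  let total := (PySem.List.pyRange 0 n 1).foldl (fun total a =>
    (PySem.List.pyRange 0 n 1).foldl (fun total b =>
      if b = a then total else
      (PySem.List.pyRange 0 n 1).foldl (fun total d =>
        if d = a ∨ d = b then total else total + pvT A a b * pvT A a d) total) total) total
  -- Case 2: a = d
  let total := (PySem.List.pyRange 0 n 1).foldl (fun total a =>
    (PySem.List.pyRange 0 n 1).foldl (fun total b =>
      if b = a then total else
      (PySem.List.pyRange 0 n 1).foldl (fun total c =>
        if c = a ∨ c = b then total else total + pvT A a b * pvT A c a) total) total) total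
  -- Case 3: b = c
  let total := (PySem.List.pyRange 0 n 1).foldl (fun total b =>
    (PySem.List.pyRange 0 n 1).foldl (fun total a =>
      if a = b then total else
      (PySem.List.pyRange 0 n 1).foldl (fun total d =>
        if d = b ∨ d = a then total else total + pvT A a b * pvT A b d) total) total) total
  -- Case 4: b = d
  let total := (PySem.List.pyRange 0 n 1).foldl (fun total b =>
    (PySem.List.pyRange 0 n 1).foldl (fun total a =>
      if a = b then total else
      (PySem.List.pyRange 0 n 1).foldl (fun total c =>
        if c = b ∨ c = a then total else total + pvT A a b * pvT A c b) total) total) total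
  total

-- ===== PORT B =====
def compute_sigma_overlap_alt (A : List (List Int)) : Int :=
  let n : Int := PySem.List.len A
  if n < 3 then 0 else
  let R : List Int := (PySem.List.pyRange 0 n 1).map (fun i =>
    ((PySem.List.pyRange 0 n 1).map (fun j => pvT A i j)).sum)
  let C : List Int := (PySem.List.pyRange 0 n 1).map (fun j =>
    ((PySem.List.pyRange 0 n 1).map (fun i => pvT A i j)).sum)
  (PySem.List.pyRange 0 n 1).foldl (fun total a =>
    let d := pvT A a a
    let row := PySem.List.pyGetD R a 0 - d
    let col := PySem.List.pyGetD C a 0 - d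
    let sq_row := ((PySem.List.pyRange 0 n 1).map (fun j => pvT A a j * pvT A a j)).sum - d * d
    let sq_col := ((PySem.List.pyRange 0 n 1).map (fun i => pvT A i a * pvT A i a)).sum - d * d
    let cross := ((PySem.List.pyRange 0 n 1).map (fun j => pvT A a j * pvT A j a)).sum - d * d
    total + (row * row - sq_row + 2 * (row * col - cross) + col * col - sq_col)) 0

-- ===== PRECONDITION & SPEC =====
-- Pre_ excludes ragged inputs with n ≥ 3 and some row shorter than n: there Python A raises
-- IndexError, except in the corner where only the last row has length n-1 (A never reads the
-- diagonal, so it returns, e.g. 568 on [[1,2,3],[4,5,6],[7,8]]) while B, which reads all n²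
-- entries, raises IndexError.
def Pre_compute_sigma_overlap (A : List (List Int)) : Prop :=
  A.length < 3 ∨ ∀ row ∈ A, A.length ≤ row.length
instance (A : List (List Int)) : Decidable (Pre_compute_sigma_overlap A) := by
  unfold Pre_compute_sigma_overlap; infer_instance
def pvWitness_compute_sigma_overlap : List (List Int) := [[1, 2, 3], [4, 5, 6], [7, 8, 9]]

def Spec_compute_sigma_overlap (A : List (List Int)) (out : Int) : Prop := out = compute_sigma_overlap_alt A
instance (A : List (List Int)) (out : Int) : Decidable (Spec_compute_sigma_overlap A out) := by unfold Spec_compute_sigma_overlap; infer_instance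

-- ===== CLAIM (what is proved, stated in full; the proofs are below) =====
def Claim_equal_compute_sigma_overlap : Prop := ∀ (A : List (List Int)), Dom_compute_sigma_overlap A → Pre_compute_sigma_overlap A → Spec_compute_sigma_overlap A (compute_sigma_overlap A)

-- ===== LEMMAS AND PROOFS =====

theorem sum_map_range {f : ℕ → ℤ} (n : ℕ) :
    ((List.range n).map f).sum = ∑ i ∈ Finset.range n, f i := by
  induction n with
  | zero => simp
  | succ m ih => simp [List.range_succ, Finset.sum_range_succ, ih]

-- one of A's triple loops, as a nested list sum
theorem triple_fold (l : List Int) (t : Int → Int → Int → Int) (init : Int) :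
    l.foldl (fun tot a => l.foldl (fun tot b =>
      if b = a then tot else
      l.foldl (fun tot d => if d = a ∨ d = b then tot else tot + t a b d) tot) tot) init
    = init + (l.map (fun a => (l.map (fun b => if b = a then 0 else
        (l.map (fun d => if d = a ∨ d = b then 0 else t a b d)).sum)).sum)).sum := by
  have h1 : ∀ (a b tot : Int),
      l.foldl (fun tot d => if d = a ∨ d = b then tot else tot + t a b d) tot
      = tot + (l.map (fun d => if d = a ∨ d = b then 0 else t a b d)).sum := by
    intro a b tot
    rw [show (fun (tot d : Int) => if d = a ∨ d = b then tot else tot + t a b d)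
        = fun tot d => tot + (if d = a ∨ d = b then 0 else t a b d) from by
      funext tot d; split <;> simp]
    exact PySem.List.foldl_add _ _ _
  have h2 : ∀ (a tot : Int),
      l.foldl (fun tot b => if b = a then tot else
        l.foldl (fun tot d => if d = a ∨ d = b then tot else tot + t a b d) tot) tot
      = tot + (l.map (fun b => if b = a then 0 else
          (l.map (fun d => if d = a ∨ d = b then 0 else t a b d)).sum)).sum := by
    intro a tot
    rw [show (fun (tot b : Int) => if b = a then tot else
        l.foldl (fun tot d => if d = a ∨ d = b then tot else tot + t a b d) tot)
        = fun tot b => tot + (if b = a then 0 else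
            (l.map (fun d => if d = a ∨ d = b then 0 else t a b d)).sum) from by
      funext tot b; rw [h1]; split <;> simp]
    exact PySem.List.foldl_add _ _ _
  rw [show (fun (tot a : Int) => l.foldl (fun tot b => if b = a then tot else
      l.foldl (fun tot d => if d = a ∨ d = b then tot else tot + t a b d) tot) tot)
      = fun tot a => tot + (l.map (fun b => if b = a then 0 else
          (l.map (fun d => if d = a ∨ d = b then 0 else t a b d)).sum)).sum from by
    funext tot a; rw [h2]]
  exact PySem.List.foldl_add _ _ _

-- A's triple sum, over Nat indices
def pvTriple (m : ℕ) (t : ℕ → ℕ → ℕ → ℤ) : ℤ :=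
  ∑ a ∈ Finset.range m, ∑ b ∈ Finset.range m, (if b = a then 0 else
    ∑ d ∈ Finset.range m, if d = a ∨ d = b then 0 else t a b d)

-- bridge: the pyRange nested list sum equals pvTriple
theorem triple_map_cast (m : ℕ) (t : Int → Int → Int → Int) :
    ((PySem.List.pyRange 0 (m:Int) 1).map (fun a =>
      ((PySem.List.pyRange 0 (m:Int) 1).map (fun b => if b = a then 0 else
        ((PySem.List.pyRange 0 (m:Int) 1).map (fun d =>
          if d = a ∨ d = b then 0 else t a b d)).sum)).sum)).sum
    = pvTriple m (fun a b d => t a b d) := by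
  unfold pvTriple
  rw [PySem.List.pyRange_one]
  simp only [Int.sub_zero, Int.toNat_natCast, List.map_map, Function.comp, zero_add,
    Nat.cast_inj, sum_map_range]

theorem triple_small (m : ℕ) (hm : m < 3) (t : ℕ → ℕ → ℕ → ℤ) : pvTriple m t = 0 := by
  apply Finset.sum_eq_zero; intro a ha
  apply Finset.sum_eq_zero; intro b hb
  split
  · rfl
  rename_i hba
  apply Finset.sum_eq_zero; intro d _hd2
  split
  · rfl
  rename_i h
  rcases not_or.mp h with ⟨h1, h2⟩
  simp only [Finset.mem_range] at ha hb _hd2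
  omega

theorem portA_eq (A : List (List Int)) :
    compute_sigma_overlap A
    = pvTriple A.length (fun a b d => pvT A ↑a ↑b * pvT A ↑a ↑d)
    + pvTriple A.length (fun a b c => pvT A ↑a ↑b * pvT A ↑c ↑a)
    + pvTriple A.length (fun b a d => pvT A ↑a ↑b * pvT A ↑b ↑d)
    + pvTriple A.length (fun b a c => pvT A ↑a ↑b * pvT A ↑c ↑b) := by
  simp only [compute_sigma_overlap, PySem.List.len_eq]
  rw [triple_fold, triple_fold, triple_fold, triple_fold,
    triple_map_cast, triple_map_cast, triple_map_cast, triple_map_cast]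
  ring

theorem portB_eq (A : List (List Int)) (h : ¬ ((A.length : Int) < 3)) :
    compute_sigma_overlap_alt A
    = ∑ a ∈ Finset.range A.length,
        (((∑ j ∈ Finset.range A.length, pvT A ↑a ↑j) - pvT A ↑a ↑a)
           * ((∑ j ∈ Finset.range A.length, pvT A ↑a ↑j) - pvT A ↑a ↑a)
         - ((∑ j ∈ Finset.range A.length, pvT A ↑a ↑j * pvT A ↑a ↑j)
            - pvT A ↑a ↑a * pvT A ↑a ↑a)
         + 2 * ((((∑ j ∈ Finset.range A.length, pvT A ↑a ↑j) - pvT A ↑a ↑a)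
                  * ((∑ j ∈ Finset.range A.length, pvT A ↑j ↑a) - pvT A ↑a ↑a))
                - ((∑ j ∈ Finset.range A.length, pvT A ↑a ↑j * pvT A ↑j ↑a)
                   - pvT A ↑a ↑a * pvT A ↑a ↑a))
         + ((∑ j ∈ Finset.range A.length, pvT A ↑j ↑a) - pvT A ↑a ↑a)
           * ((∑ j ∈ Finset.range A.length, pvT A ↑j ↑a) - pvT A ↑a ↑a)
         - ((∑ j ∈ Finset.range A.length, pvT A ↑j ↑a * pvT A ↑j ↑a)
            - pvT A ↑a ↑a * pvT A ↑a ↑a)) := by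
  simp only [compute_sigma_overlap_alt, PySem.List.len_eq]
  rw [if_neg h]
  rw [PySem.List.foldl_congr_mem (g := fun tot a => tot +
    ((((PySem.List.pyRange 0 (A.length:Int) 1).map (fun j => pvT A a j)).sum - pvT A a a)
       * (((PySem.List.pyRange 0 (A.length:Int) 1).map (fun j => pvT A a j)).sum - pvT A a a)
     - (((PySem.List.pyRange 0 (A.length:Int) 1).map (fun j => pvT A a j * pvT A a j)).sum
        - pvT A a a * pvT A a a)
     + 2 * (((((PySem.List.pyRange 0 (A.length:Int) 1).map (fun j => pvT A a j)).sum - pvT A a a)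
              * (((PySem.List.pyRange 0 (A.length:Int) 1).map (fun i => pvT A i a)).sum - pvT A a a))
            - (((PySem.List.pyRange 0 (A.length:Int) 1).map (fun j => pvT A a j * pvT A j a)).sum
               - pvT A a a * pvT A a a))
     + (((PySem.List.pyRange 0 (A.length:Int) 1).map (fun i => pvT A i a)).sum - pvT A a a)
       * (((PySem.List.pyRange 0 (A.length:Int) 1).map (fun i => pvT A i a)).sum - pvT A a a)
     - (((PySem.List.pyRange 0 (A.length:Int) 1).map (fun i => pvT A i a * pvT A i a)).sum
        - pvT A a a * pvT A a a)))]
  · rw [PySem.List.foldl_add]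
    rw [PySem.List.pyRange_one]
    simp only [Int.sub_zero, Int.toNat_natCast, List.map_map, Function.comp, zero_add,
      sum_map_range]
  · intro acc x hx
    rw [PySem.List.mem_pyRange_one] at hx
    rw [PySem.List.pyGetD_map_pyRange_of_nonneg _ _ _ _ hx.1 hx.2,
      PySem.List.pyGetD_map_pyRange_of_nonneg _ _ _ _ hx.1 hx.2]

-- closed form for one triple sum at a fixed first index
theorem core (m a : ℕ) (ha : a < m) (u v : ℕ → ℤ) :
    (∑ b ∈ Finset.range m, if b = a then 0 else
      ∑ c ∈ Finset.range m, if c = a ∨ c = b then 0 else u b * v c)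
    = ((∑ j ∈ Finset.range m, u j) - u a) * ((∑ j ∈ Finset.range m, v j) - v a)
      - ((∑ j ∈ Finset.range m, u j * v j) - u a * v a) := by
  have hmem : a ∈ Finset.range m := Finset.mem_range.2 ha
  have hinner : ∀ b : ℕ, b ≠ a →
      (∑ c ∈ Finset.range m, if c = a ∨ c = b then 0 else u b * v c)
      = u b * (∑ j ∈ Finset.range m, v j) - u b * v a
        - (if b ∈ Finset.range m then u b * v b else 0) := by
    intro b hb
    have hpt : ∀ c, (if c = a ∨ c = b then (0:ℤ) else u b * v c)
        = u b * v c - (if c = a then u b * v c else 0) - (if c = b then u b * v c else 0) := by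
      intro c
      by_cases h1 : c = a
      · have h2 : ¬ c = b := fun h => hb (h.symm.trans h1)
        rw [if_pos (Or.inl h1), if_pos h1, if_neg h2]; ring
      · by_cases h2 : c = b
        · rw [if_pos (Or.inr h2), if_neg h1, if_pos h2]; ring
        · rw [if_neg (by tauto), if_neg h1, if_neg h2]; ring
    rw [Finset.sum_congr rfl (fun c _ => hpt c), Finset.sum_sub_distrib,
      Finset.sum_sub_distrib, ← Finset.mul_sum,
      Finset.sum_ite_eq' (Finset.range m) a (fun c => u b * v c),
      Finset.sum_ite_eq' (Finset.range m) b (fun c => u b * v c)]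
    simp [hmem]
  have houter : ∀ b ∈ Finset.range m,
      (if b = a then (0:ℤ) else
        ∑ c ∈ Finset.range m, if c = a ∨ c = b then 0 else u b * v c)
      = (u b * (∑ j ∈ Finset.range m, v j) - u b * v a - u b * v b)
        - (if b = a then
            u b * (∑ j ∈ Finset.range m, v j) - u b * v a - u b * v b else 0) := by
    intro b hbm
    by_cases hb : b = a
    · simp [hb]
    · simp only [hb, hinner b hb, hbm, if_pos]
      simp
  rw [Finset.sum_congr rfl houter, Finset.sum_sub_distrib, Finset.sum_sub_distrib,
    Finset.sum_sub_distrib, ← Finset.sum_mul,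
    Finset.sum_ite_eq' (Finset.range m) a
      (fun b => u b * (∑ j ∈ Finset.range m, v j) - u b * v a - u b * v b)]
  simp only [hmem, if_pos]
  rw [show (∑ b ∈ Finset.range m, u b * v a) = (∑ b ∈ Finset.range m, u b) * v a from
    (Finset.sum_mul _ _ _).symm]
  ring

-- ===== VERDICT (by name: the statement is the Claim_ definition above) =====
theorem compute_sigma_overlap_spec : Claim_equal_compute_sigma_overlap := by
  intro A _ _
  unfold Spec_compute_sigma_overlap
  rw [portA_eq]
  by_cases h3 : (A.length : Int) < 3
  · have hm : A.length < 3 := by exact_mod_cast h3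
    have hB : compute_sigma_overlap_alt A = 0 := by
      simp only [compute_sigma_overlap_alt, PySem.List.len_eq]
      rw [if_pos h3]
    rw [hB, triple_small _ hm, triple_small _ hm, triple_small _ hm, triple_small _ hm]
    ring
  · rw [portB_eq A h3]
    unfold pvTriple
    rw [← Finset.sum_add_distrib, ← Finset.sum_add_distrib, ← Finset.sum_add_distrib]
    apply Finset.sum_congr rfl
    intro a ha
    have ha' : a < A.length := Finset.mem_range.1 ha
    rw [core _ _ ha' (fun b => pvT A ↑a ↑b) (fun d => pvT A ↑a ↑d),
      core _ _ ha' (fun b => pvT A ↑a ↑b) (fun c => pvT A ↑c ↑a),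
      core _ _ ha' (fun b => pvT A ↑b ↑a) (fun d => pvT A ↑a ↑d),
      core _ _ ha' (fun b => pvT A ↑b ↑a) (fun c => pvT A ↑c ↑a)]
    have hcomm : (∑ j ∈ Finset.range A.length, pvT A ↑j ↑a * pvT A ↑a ↑j)
        = ∑ j ∈ Finset.range A.length, pvT A ↑a ↑j * pvT A ↑j ↑a := by
      apply Finset.sum_congr rfl; intro j _; ring
    rw [hcomm]
    ring
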